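-- pv_equiv track=rewrite | github.com/Netflix/lemur | lemur/plugins/lemur_java/plugin.py | split_chain
-- ===== SOURCE A (Python) =====
-- def split_chain(chain):
--     """
--     Split the chain into individual certificates for import into keystore
--
--     :param chain:
--     :return:
--     """
--     certs = []
--     lines = chain.split('\n')
--
--     cert = []
--     for line in lines:
--         cert.append(line + '\n')
--         if line == '-----END CERTIFICATE-----':
--             certs.append("".join(cert))
--             cert = []
--
--     return certs
-- ===== SOURCE B (Python) =====
-- END_MARKER = '-----END CERTIFICATE-----'
--
--
-- def split_chain(chain):
--     """
--     Split the chain into individual certificates for import into keystore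
--
--     :param chain:
--     :return:
--     """
--     lines = chain.split('\n')
--     ends = [i for i, line in enumerate(lines) if line == END_MARKER]
--     certs = []
--     start = 0
--     for end in ends:
--         certs.append('\n'.join(lines[start:end + 1]) + '\n')
--         start = end + 1
--     return certs
-- ===== Notes on version B (the rewrite author's own statement) =====
-- stated objective: alternative
-- what changed: Instead of one pass that accumulates newline-suffixed lines and flushes whenever the end-certificate marker line is seen, B first collects the indices of the exact marker lines, then slices the line list between consecutive end indices and joins each slice with a newline.
import Mathlib
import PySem

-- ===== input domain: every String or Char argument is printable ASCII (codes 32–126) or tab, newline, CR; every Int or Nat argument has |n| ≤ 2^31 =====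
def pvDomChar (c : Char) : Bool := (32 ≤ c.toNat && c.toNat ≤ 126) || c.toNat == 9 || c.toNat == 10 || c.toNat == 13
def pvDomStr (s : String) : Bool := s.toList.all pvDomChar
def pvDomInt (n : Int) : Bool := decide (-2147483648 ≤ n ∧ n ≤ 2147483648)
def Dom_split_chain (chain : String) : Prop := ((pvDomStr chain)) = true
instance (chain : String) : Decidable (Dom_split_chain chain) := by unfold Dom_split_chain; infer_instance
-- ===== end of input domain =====

-- B returns the same list by a different decomposition: one pass collects the indices of
-- '-----END CERTIFICATE-----' lines, a second pass slices the line list between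
-- consecutive end indices and joins each slice with '\n'.

-- ===== PORT A =====
-- A: one pass accumulating lines (each with '\n' appended) and flushing on the marker line.
-- chain.split('\n'): sep is nonempty, so split? is always `some`; .getD [] is exact here.
def split_chain (chain : String) : List String :=
  ((PySem.Str.split? chain "\n").getD []).foldl
    (fun (st : List String × List String) line =>
      let cert := st.2 ++ [line ++ "\n"]
      if line = "-----END CERTIFICATE-----" then
        (st.1 ++ [PySem.Str.join "" cert], [])
      else
        (st.1, cert))
    ([], []) |>.1

-- ===== PORT B =====
def pvEndMarker : String := "-----END CERTIFICATE-----"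

-- [i for i, line in enumerate(lines) if line == END_MARKER]
def pvEnds (lines : List String) (s : Int) : List Int :=
  (PySem.List.enumerate lines s).filterMap
    (fun p => if p.2 = pvEndMarker then some p.1 else none)

def split_chain_alt (chain : String) : List String :=
  let lines := (PySem.Str.split? chain "\n").getD []
  (pvEnds lines 0).foldl
    (fun (st : List String × Int) e =>
      (st.1 ++ [PySem.Str.join "\n" (PySem.List.slice lines (some st.2) (some (e + 1))) ++ "\n"],
       e + 1))
    ([], 0) |>.1

-- ===== PRECONDITION & SPEC =====
def Spec_split_chain (chain : String) (out : List String) : Prop := out = split_chain_alt chain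
instance (chain : String) (out : List String) : Decidable (Spec_split_chain chain out) := by unfold Spec_split_chain; infer_instance

-- ===== CLAIM (what is proved, stated in full; the proofs are below) =====
def Claim_equal_split_chain : Prop := ∀ (chain : String), Dom_split_chain chain → Spec_split_chain chain (split_chain chain)

-- ===== LEMMAS AND PROOFS =====

-- Reference splitter: recursion over the remaining lines with the pending (raw) lines in `acc`.
def pvSpec (acc : List String) : List String → List String
  | [] => []
  | l :: ls =>
      if l = pvEndMarker then
        (PySem.Str.join "\n" (acc ++ [l]) ++ "\n") :: pvSpec [] ls
      else
        pvSpec (acc ++ [l]) ls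

lemma pvEnds_nil (s : Int) : pvEnds [] s = [] := rfl

lemma pvEnds_cons (l : String) (ls : List String) (s : Int) :
    pvEnds (l :: ls) s = (if l = pvEndMarker then [s] else []) ++ pvEnds ls (s + 1) := by
  simp only [pvEnds, PySem.List.enumerate_cons, List.filterMap_cons]
  split_ifs <;> simp

-- ''.join([x + '\n' for x in xs]) = '\n'.join(xs) + '\n' for nonempty xs (Chars level)
lemma pv_chars_join_nl (x : List Char) (xs : List (List Char)) :
    PySem.Chars.join [] ((x :: xs).map (· ++ ['\n'])) =
      PySem.Chars.join ['\n'] (x :: xs) ++ ['\n'] := by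
  induction xs generalizing x with
  | nil => simp [PySem.Chars.join, List.intercalate]
  | cons y ys ih =>
      have ih' := ih y
      simp only [List.map_cons] at ih' ⊢
      rw [PySem.Chars.join_cons_cons, PySem.Chars.join_cons_cons, ih']
      simp

-- same fact lifted to String
lemma pv_join_nl (x : String) (xs : List String) :
    PySem.Str.join "" ((x :: xs).map (· ++ "\n")) =
      PySem.Str.join "\n" (x :: xs) ++ "\n" := by
  apply String.toList_injective
  simp only [String.toList_append, PySem.Str.toList_join]
  have hmap : ∀ (ys : List String),
      List.map String.toList (ys.map (· ++ "\n")) =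
        (ys.map String.toList).map (· ++ ['\n']) := by
    intro ys
    simp [Function.comp]
  rw [hmap]
  have := pv_chars_join_nl x.toList (xs.map String.toList)
  simpa using this

-- A's fold equals the reference splitter.
lemma pv_A_fold (ls : List String) (certs acc : List String) :
    (ls.foldl
      (fun (st : List String × List String) line =>
        let cert := st.2 ++ [line ++ "\n"]
        if line = "-----END CERTIFICATE-----" then
          (st.1 ++ [PySem.Str.join "" cert], [])
        else
          (st.1, cert))
      (certs, acc.map (· ++ "\n"))).1 = certs ++ pvSpec acc ls := by
  induction ls generalizing certs acc with
  | nil => simp [pvSpec]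
  | cons l ls ih =>
      have hacc : acc.map (· ++ "\n") ++ [l ++ "\n"] = (acc ++ [l]).map (· ++ "\n") := by simp
      simp only [List.foldl_cons]
      by_cases hl : l = pvEndMarker
      · have hl' : l = "-----END CERTIFICATE-----" := hl
        have hjoin : PySem.Str.join "" ((acc ++ [l]).map (· ++ "\n")) =
            PySem.Str.join "\n" (acc ++ [l]) ++ "\n" := by
          cases acc with
          | nil => exact pv_join_nl l []
          | cons a as => simpa using pv_join_nl a (as ++ [l])
        rw [pvSpec, if_pos hl]
        simp only [if_pos hl', hacc, hjoin]
        have := ih (certs ++ [PySem.Str.join "\n" (acc ++ [l]) ++ "\n"]) []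
        simpa using this
      · have hl' : ¬ l = "-----END CERTIFICATE-----" := hl
        rw [pvSpec, if_neg hl]
        simp only [if_neg hl', hacc]
        exact ih certs (acc ++ [l])

-- B's fold over the end indices equals the reference splitter.
lemma pv_B_fold (ls : List String) (L dropped pre certs : List String) (s t : Int)
    (hL : L = dropped ++ pre ++ ls) (hs : s = (dropped.length : Int))
    (ht : t = s + (pre.length : Int)) :
    ((pvEnds ls t).foldl
      (fun (st : List String × Int) e =>
        (st.1 ++ [PySem.Str.join "\n"
            (PySem.List.slice L (some st.2) (some (e + 1))) ++ "\n"],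
         e + 1))
      (certs, s)).1 = certs ++ pvSpec pre ls := by
  induction ls generalizing L dropped pre certs s t with
  | nil => simp [pvEnds_nil, pvSpec]
  | cons l ls ih =>
      rw [pvEnds_cons]
      by_cases hl : l = pvEndMarker
      · rw [if_pos hl, List.singleton_append, List.foldl_cons]
        have hslice : PySem.List.slice L (some s) (some (t + 1)) = pre ++ [l] := by
          subst hL hs ht
          have hcast : (dropped.length : Int) + (pre.length : Int) + 1
              = ((dropped.length + (pre.length + 1) : Nat) : Int) := by push_cast; ring
          rw [hcast, PySem.List.slice_natCast, List.append_assoc, List.drop_left]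
          have h2 : dropped.length + (pre.length + 1) - dropped.length = pre.length + 1 := by omega
          rw [h2, List.take_append]
          simp
        simp only [hslice]
        rw [ih L (dropped ++ pre ++ [l]) [] (certs ++ [PySem.Str.join "\n" (pre ++ [l]) ++ "\n"])
            (t + 1) (t + 1)
            (by subst hL; simp)
            (by subst hs ht; simp; ring)
            (by simp)]
        rw [pvSpec, if_pos hl]
        simp
      · rw [if_neg hl, List.nil_append]
        rw [ih L dropped (pre ++ [l]) certs s (t + 1)
            (by subst hL; simp)
            hs
            (by subst ht; simp; ring)]
        rw [pvSpec, if_neg hl]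

-- ===== VERDICT (by name: the statement is the Claim_ definition above) =====
theorem split_chain_spec : Claim_equal_split_chain := by
  intro chain _
  unfold Spec_split_chain split_chain split_chain_alt
  have hA := pv_A_fold ((PySem.Str.split? chain "\n").getD []) [] []
  have hB := pv_B_fold ((PySem.Str.split? chain "\n").getD [])
      ((PySem.Str.split? chain "\n").getD []) [] [] [] 0 0 (by simp) (by simp) (by simp)
  simp only [List.map_nil, List.nil_append] at hA hB
  rw [hA, hB]
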